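-- pv_equiv track=rewrite | github.com/JeanPompeo/GatorLeaf | GatorLeaf.py | _tokens_to_strptime
-- ===== SOURCE A (Python) =====
-- def _tokens_to_strptime(fmt):
--     """
--     Map tokenized formats like 'YYYY_MM_DD' or 'MM.DD.YY' to Python strptime/strftime.
--     Supported tokens: YYYY, YY, MM, DD and time pattern 'HH:MM:SS'. Non-alnum separators are preserved.
--     """
--     # Special-case time pattern to avoid ambiguity of 'MM' (month vs minutes)
--     if isinstance(fmt, str):
--         fmt = fmt.replace("HH:MM:SS", "%H:%M:%S").replace("HH:MM", "%H:%M")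
--
--     mapping = {
--         "YYYY": "%Y",
--         "YY": "%y",
--         "MM": "%m",
--         "DD": "%d",
--     }
--     out = []
--     i = 0
--     while i < len(fmt):
--         if fmt[i:i+4] == "YYYY":
--             out.append(mapping["YYYY"]); i += 4
--         elif fmt[i:i+2] == "YY":
--             out.append(mapping["YY"]); i += 2
--         elif fmt[i:i+2] == "MM":
--             out.append(mapping["MM"]); i += 2
--         elif fmt[i:i+2] == "DD":
--             out.append(mapping["DD"]); i += 2
--         else:
--             out.append(fmt[i]); i += 1
--     return "".join(out)
-- ===== SOURCE B (Python) =====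
-- def _tokens_to_strptime(fmt):
--     # Run-length approach: tokens (YYYY/YY/MM/DD) are homogeneous-character runs,
--     # so each maximal run of one character is converted in closed form.
--     if isinstance(fmt, str):
--         fmt = fmt.replace("HH:MM:SS", "%H:%M:%S").replace("HH:MM", "%H:%M")
--     out = []
--     i = 0
--     n = len(fmt)
--     while i < n:
--         c = fmt[i]
--         j = i
--         while j < n and fmt[j] == c:
--             j += 1
--         k = j - i
--         if c == "Y":
--             q, r = divmod(k, 4)
--             out.append("%Y" * q + ("%y" if r >= 2 else "") + "Y" * (r % 2))
--         elif c == "M":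
--             out.append("%m" * (k // 2) + "M" * (k % 2))
--         elif c == "D":
--             out.append("%d" * (k // 2) + "D" * (k % 2))
--         else:
--             out.append(c * k)
--         i = j
--     return "".join(out)
-- ===== Notes on version B (the rewrite author's own statement) =====
-- stated objective: faster
-- what changed: B replaces A's per-character greedy longest-first prefix scan (try four-char then two-char tokens at every index) by run-length grouping: it finds each maximal run of one character and emits its translation in closed form via divmod arithmetic on the run length, keeping the same HH:MM:SS pre-replace.
import Mathlib
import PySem

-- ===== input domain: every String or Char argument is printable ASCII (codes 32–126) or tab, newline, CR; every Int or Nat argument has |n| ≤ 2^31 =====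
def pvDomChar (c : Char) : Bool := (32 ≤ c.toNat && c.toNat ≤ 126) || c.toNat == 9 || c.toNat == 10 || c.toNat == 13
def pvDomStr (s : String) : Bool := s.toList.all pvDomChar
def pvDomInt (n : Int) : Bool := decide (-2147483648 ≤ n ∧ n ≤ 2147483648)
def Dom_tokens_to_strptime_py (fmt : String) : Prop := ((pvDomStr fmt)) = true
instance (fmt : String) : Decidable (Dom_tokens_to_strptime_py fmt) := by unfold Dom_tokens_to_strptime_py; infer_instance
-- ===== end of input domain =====

set_option maxRecDepth 8000

-- B replaces A's char-by-char greedy longest-first token scan by run-length grouping with a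
-- closed-form expansion per maximal character run (objective: faster by a constant factor — fewer per-char slice comparisons and appends; same O(n)).

-- ===== PORT A =====
-- A's while-loop: at each position try fmt[i:i+4]=="YYYY", then "YY", "MM", "DD", else copy one char.
def pvScanA : List Char → List Char
  | [] => []
  | c :: rest =>
    if (c :: rest).take 4 = ['Y','Y','Y','Y'] then
      '%' :: 'Y' :: pvScanA ((c :: rest).drop 4)
    else if (c :: rest).take 2 = ['Y','Y'] then
      '%' :: 'y' :: pvScanA ((c :: rest).drop 2)
    else if (c :: rest).take 2 = ['M','M'] then
      '%' :: 'm' :: pvScanA ((c :: rest).drop 2)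
    else if (c :: rest).take 2 = ['D','D'] then
      '%' :: 'd' :: pvScanA ((c :: rest).drop 2)
    else
      c :: pvScanA rest
  termination_by l => l.length
  decreasing_by all_goals simp

def tokens_to_strptime_py (fmt : String) : String :=
  let f := PySem.Str.replace (PySem.Str.replace fmt "HH:MM:SS" "%H:%M:%S") "HH:MM" "%H:%M"
  String.ofList (pvScanA f.toList)

-- ===== PORT B =====
-- closed-form expansion of one maximal run of k copies of c (B's if/elif arithmetic per run)
def pvExpand (c : Char) (k : Nat) : List Char :=
  if c = 'Y' then
    (List.replicate (k / 4) ['%','Y']).flatten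
      ++ (if k % 4 ≥ 2 then ['%','y'] else [])
      ++ List.replicate (k % 4 % 2) 'Y'
  else if c = 'M' then
    (List.replicate (k / 2) ['%','m']).flatten ++ List.replicate (k % 2) 'M'
  else if c = 'D' then
    (List.replicate (k / 2) ['%','d']).flatten ++ List.replicate (k % 2) 'D'
  else
    List.replicate k c

-- B's outer loop: take the maximal run at the front, expand it, continue after the run.
def pvScanB : List Char → List Char
  | [] => []
  | c :: rest =>
    pvExpand c (1 + (rest.takeWhile (· == c)).length) ++ pvScanB (rest.dropWhile (· == c))
  termination_by l => l.length
  decreasing_by simp; exact List.length_dropWhile_le _ _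

def tokens_to_strptime_py_alt (fmt : String) : String :=
  let f := PySem.Str.replace (PySem.Str.replace fmt "HH:MM:SS" "%H:%M:%S") "HH:MM" "%H:%M"
  String.ofList (pvScanB f.toList)

-- ===== PRECONDITION & SPEC =====
def Spec_tokens_to_strptime_py (fmt : String) (out : String) : Prop := out = tokens_to_strptime_py_alt fmt
instance (fmt : String) (out : String) : Decidable (Spec_tokens_to_strptime_py fmt out) := by unfold Spec_tokens_to_strptime_py; infer_instance

-- ===== CLAIM (what is proved, stated in full; the proofs are below) =====
def Claim_equal_tokens_to_strptime_py : Prop := ∀ (fmt : String), Dom_tokens_to_strptime_py fmt → Spec_tokens_to_strptime_py fmt (tokens_to_strptime_py fmt)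

-- ===== LEMMAS AND PROOFS =====

lemma stepY4 (l : List Char) : pvScanA ('Y'::'Y'::'Y'::'Y'::l) = '%'::'Y'::pvScanA l := by
  rw [pvScanA]; simp

lemma stepY3 (l : List Char) (h : l.head? ≠ some 'Y') :
    pvScanA ('Y'::'Y'::'Y'::l) = '%'::'y'::pvScanA ('Y'::l) := by
  rcases l with _ | ⟨a, l⟩
  · simp [pvScanA]
  · have ha : a ≠ 'Y' := by simpa using h
    rw [pvScanA]; simp [ha]

lemma stepY2 (l : List Char) (h : l.head? ≠ some 'Y') :
    pvScanA ('Y'::'Y'::l) = '%'::'y'::pvScanA l := by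
  rcases l with _ | ⟨a, l⟩
  · simp [pvScanA]
  · have ha : a ≠ 'Y' := by simpa using h
    rw [pvScanA]; simp [ha]

lemma stepY1 (l : List Char) (h : l.head? ≠ some 'Y') :
    pvScanA ('Y'::l) = 'Y'::pvScanA l := by
  rcases l with _ | ⟨a, l⟩
  · simp [pvScanA]
  · have ha : a ≠ 'Y' := by simpa using h
    rw [pvScanA]; simp [ha]

lemma stepM2 (l : List Char) : pvScanA ('M'::'M'::l) = '%'::'m'::pvScanA l := by
  rw [pvScanA]; simp

lemma stepM1 (l : List Char) (h : l.head? ≠ some 'M') :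
    pvScanA ('M'::l) = 'M'::pvScanA l := by
  rcases l with _ | ⟨a, l⟩
  · simp [pvScanA]
  · have ha : a ≠ 'M' := by simpa using h
    rw [pvScanA]; simp [ha]

lemma stepD2 (l : List Char) : pvScanA ('D'::'D'::l) = '%'::'d'::pvScanA l := by
  rw [pvScanA]; simp

lemma stepD1 (l : List Char) (h : l.head? ≠ some 'D') :
    pvScanA ('D'::l) = 'D'::pvScanA l := by
  rcases l with _ | ⟨a, l⟩
  · simp [pvScanA]
  · have ha : a ≠ 'D' := by simpa using h
    rw [pvScanA]; simp [ha]

lemma stepOther (c : Char) (l : List Char) (hY : c ≠ 'Y') (hM : c ≠ 'M') (hD : c ≠ 'D') :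
    pvScanA (c::l) = c::pvScanA l := by
  rw [pvScanA]; simp [hY, hM, hD]

lemma expandY_succ4 (n : Nat) : pvExpand 'Y' (n+4) = '%'::'Y'::pvExpand 'Y' n := by
  simp [pvExpand, Nat.add_div_right, Nat.add_mod_right, List.replicate_succ]

lemma expandM_succ2 (n : Nat) : pvExpand 'M' (n+2) = '%'::'m'::pvExpand 'M' n := by
  simp [pvExpand, Nat.add_div_right, Nat.add_mod_right, List.replicate_succ]

lemma expandD_succ2 (n : Nat) : pvExpand 'D' (n+2) = '%'::'d'::pvExpand 'D' n := by
  simp [pvExpand, Nat.add_div_right, Nat.add_mod_right, List.replicate_succ]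

lemma runY : ∀ k (rest : List Char), rest.head? ≠ some 'Y' →
    pvScanA (List.replicate k 'Y' ++ rest) = pvExpand 'Y' k ++ pvScanA rest := by
  intro k
  induction k using Nat.strong_induction_on with
  | _ k ih =>
    intro rest h
    match k with
    | 0 => simp [pvExpand]
    | 1 => simpa [pvExpand] using stepY1 rest h
    | 2 => simpa [pvExpand] using stepY2 rest h
    | 3 =>
      have e1 := stepY3 rest h
      have e2 := stepY1 rest h
      simp only [List.replicate, List.cons_append, List.nil_append]
      rw [e1, e2]; rfl
    | (n+4) =>
      have : List.replicate (n+4) 'Y' ++ rest = 'Y'::'Y'::'Y'::'Y'::(List.replicate n 'Y' ++ rest) := by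
        simp [List.replicate_succ]
      rw [this, stepY4, ih n (by omega) rest h, expandY_succ4]; rfl

lemma runM : ∀ k (rest : List Char), rest.head? ≠ some 'M' →
    pvScanA (List.replicate k 'M' ++ rest) = pvExpand 'M' k ++ pvScanA rest := by
  intro k
  induction k using Nat.strong_induction_on with
  | _ k ih =>
    intro rest h
    match k with
    | 0 => simp [pvExpand]
    | 1 => simpa [pvExpand] using stepM1 rest h
    | (n+2) =>
      have : List.replicate (n+2) 'M' ++ rest = 'M'::'M'::(List.replicate n 'M' ++ rest) := by
        simp [List.replicate_succ]
      rw [this, stepM2, ih n (by omega) rest h, expandM_succ2]; rfl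

lemma runD : ∀ k (rest : List Char), rest.head? ≠ some 'D' →
    pvScanA (List.replicate k 'D' ++ rest) = pvExpand 'D' k ++ pvScanA rest := by
  intro k
  induction k using Nat.strong_induction_on with
  | _ k ih =>
    intro rest h
    match k with
    | 0 => simp [pvExpand]
    | 1 => simpa [pvExpand] using stepD1 rest h
    | (n+2) =>
      have : List.replicate (n+2) 'D' ++ rest = 'D'::'D'::(List.replicate n 'D' ++ rest) := by
        simp [List.replicate_succ]
      rw [this, stepD2, ih n (by omega) rest h, expandD_succ2]; rfl

lemma runOther (c : Char) (hY : c ≠ 'Y') (hM : c ≠ 'M') (hD : c ≠ 'D') :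
    ∀ k (rest : List Char),
      pvScanA (List.replicate k c ++ rest) = pvExpand c k ++ pvScanA rest := by
  intro k
  induction k with
  | zero => simp [pvExpand, hY, hM, hD]
  | succ n ihn =>
    intro rest
    have : List.replicate (n+1) c ++ rest = c::(List.replicate n c ++ rest) := by
      simp [List.replicate_succ]
    rw [this, stepOther c _ hY hM hD, ihn rest]
    simp [pvExpand, hY, hM, hD, List.replicate_succ]

lemma scanAB (l : List Char) : pvScanA l = pvScanB l := by
  suffices H : ∀ n (l : List Char), l.length ≤ n → pvScanA l = pvScanB l from
    H l.length l le_rfl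
  intro n
  induction n with
  | zero =>
    intro l hl
    have : l = [] := List.eq_nil_of_length_eq_zero (Nat.le_zero.mp hl)
    subst this; simp [pvScanA, pvScanB]
  | succ n ihn =>
    intro l hl
    rcases l with _ | ⟨c, rest⟩
    · simp [pvScanA, pvScanB]
    · have hsplit : rest = rest.takeWhile (· == c) ++ rest.dropWhile (· == c) :=
        (List.takeWhile_append_dropWhile).symm
      have ht : rest.takeWhile (· == c) = List.replicate (rest.takeWhile (· == c)).length c := by
        apply List.eq_replicate_length.2
        intro x hx
        simpa using List.mem_takeWhile_imp hx
      have hr : (rest.dropWhile (· == c)).head? ≠ some c := by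
        intro heq
        have := List.head?_dropWhile_not (· == c) rest
        rw [heq] at this
        simp at this
      have hcons : c :: rest =
          List.replicate (1 + (rest.takeWhile (· == c)).length) c ++ rest.dropWhile (· == c) := by
        rw [Nat.add_comm, List.replicate_succ, List.cons_append]
        rw [← ht, ← hsplit]
      have hlen : (rest.dropWhile (· == c)).length ≤ n :=
        le_trans (List.length_dropWhile_le _ _) (Nat.le_of_succ_le_succ hl)
      rw [pvScanB, hcons, ← ihn _ hlen]
      by_cases hY : c = 'Y'
      · subst hY; exact runY _ _ hr
      by_cases hM : c = 'M'
      · subst hM; exact runM _ _ hr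
      by_cases hD : c = 'D'
      · subst hD; exact runD _ _ hr
      exact runOther c hY hM hD _ _

-- ===== VERDICT (by name: the statement is the Claim_ definition above) =====
theorem tokens_to_strptime_py_spec : Claim_equal_tokens_to_strptime_py := by
  intro fmt _
  unfold Spec_tokens_to_strptime_py tokens_to_strptime_py tokens_to_strptime_py_alt
  simp [scanAB]
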